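-- pv_equiv track=rewrite | github.com/RemcoSchrijver/advent-of-code | 2024/src/day12.py | calculate_fence_cost
-- ===== SOURCE A (Python) =====
-- def calculate_fence_cost(farm: dict[str, list[set[tuple[int, int]]]]) -> int:
--     total_cost = 0
--     for plots in farm.values():
--         for plot in plots:
--             plot_area = len(plot)
--             plot_circumference = 0
--             for plot_tile in plot:
--                 y, x = plot_tile
--                 if (y - 1, x) not in plot:
--                     plot_circumference += 1
--                 if (y, x - 1) not in plot:
--                     plot_circumference += 1
--                 if (y + 1, x) not in plot:
--                     plot_circumference += 1
--                 if (y, x + 1) not in plot: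
--                     plot_circumference += 1
--             total_cost += plot_area * plot_circumference
--     return total_cost
-- ===== SOURCE B (Python) =====
-- def calculate_fence_cost(farm: dict[str, list[set[tuple[int, int]]]]) -> int:
--     total_cost = 0
--     for plots in farm.values():
--         for plot in plots:
--             area = len(plot)
--             edges = sum(((y + 1, x) in plot) + ((y, x + 1) in plot) for (y, x) in plot)
--             total_cost += area * (4 * area - 2 * edges)
--     return total_cost
-- ===== Notes on version B (the rewrite author's own statement) =====
-- stated objective: alternative
-- what changed: B replaces the 4-neighbor exposed-side tally per tile by counting each interior shared edge once (only the two forward neighbors (y+1,x) and (y,x+1)) and uses the closed form perimeter = 4*area - 2*edges.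
import Mathlib
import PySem

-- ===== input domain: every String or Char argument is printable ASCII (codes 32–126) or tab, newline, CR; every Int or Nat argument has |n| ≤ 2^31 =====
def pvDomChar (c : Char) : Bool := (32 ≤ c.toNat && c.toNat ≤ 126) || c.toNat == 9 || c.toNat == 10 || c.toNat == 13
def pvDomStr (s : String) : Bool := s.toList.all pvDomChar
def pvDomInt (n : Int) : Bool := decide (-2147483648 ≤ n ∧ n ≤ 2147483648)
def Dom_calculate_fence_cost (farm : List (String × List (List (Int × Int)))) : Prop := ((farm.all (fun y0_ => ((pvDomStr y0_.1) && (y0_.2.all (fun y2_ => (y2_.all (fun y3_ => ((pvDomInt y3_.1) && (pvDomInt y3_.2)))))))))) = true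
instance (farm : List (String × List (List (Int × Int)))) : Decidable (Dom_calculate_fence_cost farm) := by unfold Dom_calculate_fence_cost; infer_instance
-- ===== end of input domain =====

-- B counts each interior shared edge once (forward neighbors only) and uses perimeter = 4*area - 2*edges,
-- instead of A's tally of exposed sides (4 membership tests per tile); same cost, different decomposition.

-- ===== PORT A =====
def calculate_fence_cost (farm : List (String × List (List (Int × Int)))) : Int :=
  farm.foldl (fun total_cost kv =>
    kv.2.foldl (fun total_cost plot =>
      let plot_area : Int := plot.length
      let plot_circumference : Int :=
        plot.foldl (fun c t =>
          let y := t.1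
          let x := t.2
          let c := if !(plot.contains (y - 1, x)) then c + 1 else c
          let c := if !(plot.contains (y, x - 1)) then c + 1 else c
          let c := if !(plot.contains (y + 1, x)) then c + 1 else c
          let c := if !(plot.contains (y, x + 1)) then c + 1 else c
          c) 0
      total_cost + plot_area * plot_circumference) total_cost) 0

-- ===== PORT B =====
def calculate_fence_cost_alt (farm : List (String × List (List (Int × Int)))) : Int :=
  farm.foldl (fun total_cost kv =>
    kv.2.foldl (fun total_cost plot =>
      let area : Int := plot.length
      let edges : Int :=
        (plot.map (fun t =>
          (if plot.contains (t.1 + 1, t.2) then (1 : Int) else 0) +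
          (if plot.contains (t.1, t.2 + 1) then (1 : Int) else 0))).sum
      total_cost + area * (4 * area - 2 * edges)) total_cost) 0

-- ===== PRECONDITION & SPEC =====
-- Pre_ requires each plot list to have no duplicate tiles: in Python a plot is a set[tuple[int,int]],
-- which by the type convention is encoded as a list of DISTINCT elements, so Pre_ excludes nothing
-- a Python caller can actually pass.
def Pre_calculate_fence_cost (farm : List (String × List (List (Int × Int)))) : Prop :=
  ∀ kv ∈ farm, ∀ plot ∈ kv.2, plot.Nodup
instance (farm : List (String × List (List (Int × Int)))) : Decidable (Pre_calculate_fence_cost farm) := by unfold Pre_calculate_fence_cost; infer_instance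
def pvWitness_calculate_fence_cost : (List (String × List (List (Int × Int)))) :=
  [("A", [[(0, 0), (0, 1), (1, 1)], [(5, 5)]]), ("B", [[]])]
def Spec_calculate_fence_cost (farm : List (String × List (List (Int × Int)))) (out : Int) : Prop := out = calculate_fence_cost_alt farm
instance (farm : List (String × List (List (Int × Int)))) (out : Int) : Decidable (Spec_calculate_fence_cost farm out) := by unfold Spec_calculate_fence_cost; infer_instance

-- ===== CLAIM (what is proved, stated in full; the proofs are below) =====
def Claim_equal_calculate_fence_cost : Prop := ∀ (farm : List (String × List (List (Int × Int)))), Dom_calculate_fence_cost farm → Pre_calculate_fence_cost farm → Spec_calculate_fence_cost farm (calculate_fence_cost farm)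

-- ===== LEMMAS AND PROOFS =====

theorem foldl_add_int' {α : Type} (l : List α) (g : α → Int) (a : Int) :
    l.foldl (fun c t => c + g t) a = a + (l.map g).sum := by
  induction l generalizing a with
  | nil => simp
  | cons hd tl ih => simp [ih]; ring

-- A's per-tile step adds (4 - number of present neighbors); the whole inner loop is a sum.
theorem circ_fold_eq (plot : List (Int × Int)) (init : Int) :
    plot.foldl (fun c t =>
      let y := t.1
      let x := t.2
      let c := if !(plot.contains (y - 1, x)) then c + 1 else c
      let c := if !(plot.contains (y, x - 1)) then c + 1 else c
      let c := if !(plot.contains (y + 1, x)) then c + 1 else c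
      let c := if !(plot.contains (y, x + 1)) then c + 1 else c
      c) init
    = init + (plot.map (fun t =>
        (4 : Int)
        - ((if plot.contains (t.1 - 1, t.2) then (1 : Int) else 0)
         + (if plot.contains (t.1, t.2 - 1) then (1 : Int) else 0)
         + (if plot.contains (t.1 + 1, t.2) then (1 : Int) else 0)
         + (if plot.contains (t.1, t.2 + 1) then (1 : Int) else 0)))).sum := by
  have hstep : (fun (c : Int) (t : Int × Int) =>
      let y := t.1
      let x := t.2
      let c := if !(plot.contains (y - 1, x)) then c + 1 else c
      let c := if !(plot.contains (y, x - 1)) then c + 1 else c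
      let c := if !(plot.contains (y + 1, x)) then c + 1 else c
      let c := if !(plot.contains (y, x + 1)) then c + 1 else c
      c)
      = fun (c : Int) (t : Int × Int) => c +
        ((4 : Int)
        - ((if plot.contains (t.1 - 1, t.2) then (1 : Int) else 0)
         + (if plot.contains (t.1, t.2 - 1) then (1 : Int) else 0)
         + (if plot.contains (t.1 + 1, t.2) then (1 : Int) else 0)
         + (if plot.contains (t.1, t.2 + 1) then (1 : Int) else 0))) := by
    funext c t
    simp only [Bool.not_eq_eq_eq_not, Bool.not_true]
    split_ifs <;> simp_all <;> omega
  rw [hstep, foldl_add_int']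

theorem sum_map_ind {α : Type} (l : List α) (p : α → Bool) :
    (l.map (fun t => if p t then (1 : Int) else 0)).sum = (l.countP p : Int) := by
  induction l with
  | nil => simp
  | cons hd tl ih =>
    simp only [List.map_cons, List.sum_cons, List.countP_cons, ih]
    split_ifs <;> push_cast <;> ring

theorem sum_map_add' {α : Type} (l : List α) (f g : α → Int) :
    (l.map (fun t => f t + g t)).sum = (l.map f).sum + (l.map g).sum := by
  induction l with
  | nil => simp
  | cons hd tl ih => simp [ih]; ring

theorem sum_map_four_sub {α : Type} (l : List α) (f g h' k : α → Int) :
    (l.map (fun t => (4 : Int) - (f t + g t + h' t + k t))).sum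
    = 4 * (l.length : Int) - ((l.map f).sum + (l.map g).sum + (l.map h').sum + (l.map k).sum) := by
  induction l with
  | nil => simp
  | cons hd tl ih => simp [ih]; ring

-- indicator sums over a duplicate-free list are invariant under shifting the tested point,
-- because t ↦ (t.1+a, t.2+b) is a bijection between {t ∈ plot | shifted ∈ plot} and {t ∈ plot | unshifted ∈ plot}
theorem shift_sum (plot : List (Int × Int)) (h : plot.Nodup) (a b : Int) :
    (plot.map (fun t => if plot.contains (t.1 + a, t.2 + b) then (1 : Int) else 0)).sum
    = (plot.map (fun t => if plot.contains (t.1 - a, t.2 - b) then (1 : Int) else 0)).sum := by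
  rw [sum_map_ind, sum_map_ind]
  congr 1
  have hc : ∀ (q : (Int × Int) → Bool),
      plot.countP q = ((plot.toFinset).filter (fun t => q t)).card := by
    intro q
    rw [List.countP_eq_length_filter, ← List.toFinset_filter,
        List.toFinset_card_of_nodup (h.filter q)]
  rw [hc, hc]
  apply Finset.card_bij (fun t _ => ((t.1 + a, t.2 + b) : Int × Int))
  · intro t ht
    simp only [Finset.mem_filter, List.mem_toFinset, List.contains_iff_mem] at ht ⊢
    refine ⟨ht.2, ?_⟩
    simpa using ht.1
  · intro t1 h1 t2 h2 he
    obtain ⟨ha', hb'⟩ := Prod.mk.inj he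
    have h1' : t1.1 = t2.1 := by omega
    have h2' : t1.2 = t2.2 := by omega
    exact Prod.ext h1' h2'
  · intro u hu
    simp only [Finset.mem_filter, List.mem_toFinset, List.contains_iff_mem] at hu
    refine ⟨(u.1 - a, u.2 - b), ?_, ?_⟩
    · simp only [Finset.mem_filter, List.mem_toFinset, List.contains_iff_mem]
      constructor
      · exact hu.2
      · simpa using hu.1
    · simp

-- per-plot equality of the two cost computations
theorem plot_cost_eq (plot : List (Int × Int)) (h : plot.Nodup) :
    (plot.length : Int) *
      (plot.foldl (fun c t =>
        let y := t.1
        let x := t.2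
        let c := if !(plot.contains (y - 1, x)) then c + 1 else c
        let c := if !(plot.contains (y, x - 1)) then c + 1 else c
        let c := if !(plot.contains (y + 1, x)) then c + 1 else c
        let c := if !(plot.contains (y, x + 1)) then c + 1 else c
        c) 0)
    = (plot.length : Int) *
      (4 * (plot.length : Int) - 2 *
        (plot.map (fun t =>
          (if plot.contains (t.1 + 1, t.2) then (1 : Int) else 0) +
          (if plot.contains (t.1, t.2 + 1) then (1 : Int) else 0))).sum) := by
  rw [circ_fold_eq, zero_add]
  congr 1
  rw [sum_map_four_sub]
  have s1 := shift_sum plot h 1 0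
  have s2 := shift_sum plot h 0 1
  simp only [add_zero, sub_zero] at s1 s2
  rw [sum_map_add']
  -- the backward indicators equal the forward ones
  rw [show (plot.map (fun t => if plot.contains (t.1 - 1, t.2) then (1:Int) else 0)).sum
        = (plot.map (fun t => if plot.contains (t.1 + 1, t.2) then (1:Int) else 0)).sum from s1.symm,
      show (plot.map (fun t => if plot.contains (t.1, t.2 - 1) then (1:Int) else 0)).sum
        = (plot.map (fun t => if plot.contains (t.1, t.2 + 1) then (1:Int) else 0)).sum from s2.symm]
  ring

theorem inner_fold_eq (plots : List (List (Int × Int))) (init : Int)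
    (h : ∀ plot ∈ plots, plot.Nodup) :
    plots.foldl (fun total_cost plot =>
      let plot_area : Int := plot.length
      let plot_circumference : Int :=
        plot.foldl (fun c t =>
          let y := t.1
          let x := t.2
          let c := if !(plot.contains (y - 1, x)) then c + 1 else c
          let c := if !(plot.contains (y, x - 1)) then c + 1 else c
          let c := if !(plot.contains (y + 1, x)) then c + 1 else c
          let c := if !(plot.contains (y, x + 1)) then c + 1 else c
          c) 0
      total_cost + plot_area * plot_circumference) init
    = plots.foldl (fun total_cost plot =>
      let area : Int := plot.length
      let edges : Int :=
        (plot.map (fun t =>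
          (if plot.contains (t.1 + 1, t.2) then (1 : Int) else 0) +
          (if plot.contains (t.1, t.2 + 1) then (1 : Int) else 0))).sum
      total_cost + area * (4 * area - 2 * edges)) init := by
  induction plots generalizing init with
  | nil => rfl
  | cons hd tl ih =>
    simp only [List.foldl_cons]
    rw [plot_cost_eq hd (h hd (by simp))]
    exact ih _ (fun p hp => h p (by simp [hp]))

theorem outer_fold_eq (farm : List (String × List (List (Int × Int)))) (init : Int)
    (h : ∀ kv ∈ farm, ∀ plot ∈ kv.2, plot.Nodup) :
    farm.foldl (fun total_cost kv =>
      kv.2.foldl (fun total_cost plot =>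
        let plot_area : Int := plot.length
        let plot_circumference : Int :=
          plot.foldl (fun c t =>
            let y := t.1
            let x := t.2
            let c := if !(plot.contains (y - 1, x)) then c + 1 else c
            let c := if !(plot.contains (y, x - 1)) then c + 1 else c
            let c := if !(plot.contains (y + 1, x)) then c + 1 else c
            let c := if !(plot.contains (y, x + 1)) then c + 1 else c
            c) 0
        total_cost + plot_area * plot_circumference) total_cost) init
    = farm.foldl (fun total_cost kv =>
      kv.2.foldl (fun total_cost plot =>
        let area : Int := plot.length
        let edges : Int :=
          (plot.map (fun t =>
            (if plot.contains (t.1 + 1, t.2) then (1 : Int) else 0) +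
            (if plot.contains (t.1, t.2 + 1) then (1 : Int) else 0))).sum
        total_cost + area * (4 * area - 2 * edges)) total_cost) init := by
  induction farm generalizing init with
  | nil => rfl
  | cons hd tl ih =>
    simp only [List.foldl_cons]
    rw [inner_fold_eq hd.2 init (h hd (by simp))]
    exact ih _ (fun kv hkv => h kv (by simp [hkv]))

-- ===== VERDICT (by name: the statement is the Claim_ definition above) =====
theorem calculate_fence_cost_spec : Claim_equal_calculate_fence_cost := by
  intro farm _ hpre
  unfold Spec_calculate_fence_cost calculate_fence_cost calculate_fence_cost_alt
  exact outer_fold_eq farm 0 hpre
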